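-- pv_equiv track=rewrite | github.com/Lakshmanwadhwani/CRISPR-Target-Genie | scripts/pam_input.py | validate_pam_sequence
-- ===== SOURCE A (Python) =====
-- def validate_pam_sequence(pam):
--     """
--     Function to validate if the input PAM sequence is valid
--     """
--  # Convert the input to uppercase before validating it
--     pam = pam.upper()
--     # Check if the PAM sequence contains only 'A', 'T', 'C', 'G', 'N'
--     for base in pam:
--         if base not in ['A', 'T', 'C', 'G', 'N']:
--             return False
--     # Check if the length of PAM is appropriate (usually 2-6 bases)
--     if 2 <= len(pam) <= 6:
--         return True
--     else:
--         return False
-- ===== SOURCE B (Python) =====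
-- import re
--
-- def validate_pam_sequence(pam):
--     """
--     Function to validate if the input PAM sequence is valid
--     """
--     # one anchored regex: character class [ATCGN] and length quantifier {2,6}
--     return re.fullmatch(r'[ATCGN]{2,6}', pam.upper()) is not None
-- ===== Notes on version B (the rewrite author's own statement) =====
-- stated objective: idiomatic
-- what changed: Replaced the per-character loop with early return plus a separate length guard by a single anchored regex re.fullmatch(r'[ATCGN]{2,6}', pam.upper()), which encodes the allowed base set as a character class and the length bound as a quantifier.
import Mathlib
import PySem

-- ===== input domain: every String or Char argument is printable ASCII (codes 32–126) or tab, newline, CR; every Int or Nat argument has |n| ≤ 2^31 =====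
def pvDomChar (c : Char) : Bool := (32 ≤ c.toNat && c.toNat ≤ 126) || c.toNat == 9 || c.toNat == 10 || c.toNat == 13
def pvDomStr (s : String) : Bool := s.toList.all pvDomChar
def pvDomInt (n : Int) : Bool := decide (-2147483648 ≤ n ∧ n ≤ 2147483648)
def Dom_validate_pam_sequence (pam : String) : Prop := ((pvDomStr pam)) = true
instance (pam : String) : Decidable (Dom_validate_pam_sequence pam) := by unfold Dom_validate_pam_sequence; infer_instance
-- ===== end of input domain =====

-- B replaces A's per-character loop + separate length guard with a single anchored
-- regex fullmatch (character class + {2,6} quantifier); objective: idiomatic.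


-- ===== PORT A =====
-- the for-loop with its early 'return False'; the trailing length check is the
-- value returned when the loop finishes (it only reads len(pam), fixed up front)
def pvLoopA (lenOk : Bool) : List Char → Bool
  | [] => if lenOk then true else false
  | base :: rest =>
      if !(base ∈ ['A', 'T', 'C', 'G', 'N']) then false else pvLoopA lenOk rest

def validate_pam_sequence (pam : String) : Bool :=
  let pam := PySem.Str.upper pam
  pvLoopA (decide (2 ≤ PySem.Str.len pam ∧ PySem.Str.len pam ≤ 6)) pam.toList

-- ===== PORT B =====
-- re.fullmatch(r'[ATCGN]{2,6}', pam.upper()) is not None, ported exactly by the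
-- regex's meaning: every character in the class [ATCGN] and the length in 2..6
def validate_pam_sequence_alt (pam : String) : Bool :=
  let s := (PySem.Str.upper pam).toList
  decide (2 ≤ s.length ∧ s.length ≤ 6) && s.all (fun c => c ∈ ['A', 'T', 'C', 'G', 'N'])

-- ===== PRECONDITION & SPEC =====
def Spec_validate_pam_sequence (pam : String) (out : Bool) : Prop := out = validate_pam_sequence_alt pam
instance (pam : String) (out : Bool) : Decidable (Spec_validate_pam_sequence pam out) := by unfold Spec_validate_pam_sequence; infer_instance

-- ===== CLAIM (what is proved, stated in full; the proofs are below) =====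
def Claim_equal_validate_pam_sequence : Prop := ∀ (pam : String), Dom_validate_pam_sequence pam → Spec_validate_pam_sequence pam (validate_pam_sequence pam)

-- ===== LEMMAS AND PROOFS =====
theorem pvLoopA_eq (lenOk : Bool) (l : List Char) :
    pvLoopA lenOk l = (lenOk && l.all (fun c => c ∈ ['A', 'T', 'C', 'G', 'N'])) := by
  induction l with
  | nil => cases lenOk <;> simp [pvLoopA]
  | cons c rest ih =>
    by_cases h : c ∈ ['A', 'T', 'C', 'G', 'N']
    · fin_cases h <;> simp [pvLoopA, ih]
    · simp [pvLoopA, h]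
      intro _ h2
      simp only [List.mem_cons] at h
      tauto

-- ===== VERDICT (by name: the statement is the Claim_ definition above) =====
theorem validate_pam_sequence_spec : Claim_equal_validate_pam_sequence := by
  intro pam _
  unfold Spec_validate_pam_sequence validate_pam_sequence validate_pam_sequence_alt
  simp [pvLoopA_eq, PySem.Str.len_eq]
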